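-- pv_equiv track=rewrite | github.com/Makaroshka-1/WebDev | lab7/codingbat/list_2/sum13.py | sum13
-- ===== SOURCE A (Python) =====
-- def sum13(nums):
--   if len(nums)==0:
--     return 0
--
--   sum = 0
--
--   if nums[len(nums)-1]==13:
--     nums[len(nums)-1]=0
--
--   for i in range(len(nums)-1):
--     if nums[i]==13:
--       nums[i]=0
--       nums[i+1]=0
--
--   for i in range(len(nums)):
--     sum+=nums[i]
--
--   return sum
-- ===== SOURCE B (Python) =====
-- def sum13(nums):
--     # Single forward pass with a skip flag; computes the return value only
--     # (A also zeroes 13s inside nums in place; B does not mutate its argument).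
--     total = 0
--     skip = False
--     for x in nums:
--         if skip:
--             skip = False
--         elif x == 13:
--             skip = True
--         else:
--             total += x
--     return total
-- ===== Notes on version B (the rewrite author's own statement) =====
-- stated objective: simpler
-- what changed: Replaced A's three phases (zero a trailing 13, a pair-zeroing pass over indices, then a summing pass) by a single forward pass with a skip flag and a running total; B does not mutate nums (return-value equivalence).
import Mathlib
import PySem

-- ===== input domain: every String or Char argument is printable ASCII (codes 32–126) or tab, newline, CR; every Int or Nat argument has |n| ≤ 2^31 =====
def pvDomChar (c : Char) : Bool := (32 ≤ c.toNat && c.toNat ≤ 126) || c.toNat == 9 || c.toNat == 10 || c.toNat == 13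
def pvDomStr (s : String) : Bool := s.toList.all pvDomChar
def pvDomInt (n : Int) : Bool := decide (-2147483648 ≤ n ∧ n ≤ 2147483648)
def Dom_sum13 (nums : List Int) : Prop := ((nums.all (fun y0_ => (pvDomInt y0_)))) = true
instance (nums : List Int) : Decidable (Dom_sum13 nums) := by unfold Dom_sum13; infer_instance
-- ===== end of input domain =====

-- B replaces A's three phases (zero trailing 13, zero 13-pairs, then sum) by one pass with a
-- skip flag; equivalence is about the RETURN value only (A also zeroes 13s inside nums in place, B does not mutate).

-- ===== PORT A =====
-- body of A's pair-zeroing loop (all indices it touches are in range, so getD/set are exact)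
def pvStep (ns : List Int) (i : Nat) : List Int :=
  if ns.getD i 0 = 13 then (ns.set i 0).set (i + 1) 0 else ns

def sum13 (nums : List Int) : Int :=
  if nums.length = 0 then 0
  else
    let n1 := if nums.getD (nums.length - 1) 0 = 13 then nums.set (nums.length - 1) 0 else nums
    let n2 := (List.range (n1.length - 1)).foldl pvStep n1
    (List.range n2.length).foldl (fun s i => s + n2.getD i 0) 0

-- ===== PORT B =====
def pvGo : List Int → Bool → Int → Int
  | [], _, total => total
  | _ :: xs, true, total => pvGo xs false total
  | x :: xs, false, total => if x = 13 then pvGo xs true total else pvGo xs false (total + x)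

def sum13_alt (nums : List Int) : Int := pvGo nums false 0

-- ===== PRECONDITION & SPEC =====
def Spec_sum13 (nums : List Int) (out : Int) : Prop := out = sum13_alt nums
instance (nums : List Int) (out : Int) : Decidable (Spec_sum13 nums out) := by unfold Spec_sum13; infer_instance

-- ===== CLAIM (what is proved, stated in full; the proofs are below) =====
def Claim_equal_sum13 : Prop := ∀ (nums : List Int), Dom_sum13 nums → Spec_sum13 nums (sum13 nums)

-- ===== LEMMAS AND PROOFS =====

-- A's phase-0 "zero the last element if it is 13", as a named function
def pvFix (ns : List Int) : List Int :=
  if ns.getD (ns.length - 1) 0 = 13 then ns.set (ns.length - 1) 0 else ns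

-- A's pair-zeroing loop, as a named function
def pvZero (ns : List Int) : List Int := (List.range (ns.length - 1)).foldl pvStep ns

theorem pvStep_cons_succ (h : Int) (t : List Int) (i : Nat) :
    pvStep (h :: t) (i + 1) = h :: pvStep t i := by
  simp only [pvStep, List.getD_cons_succ]
  split <;> simp

theorem foldl_pvStep_map_succ (l : List Nat) (h : Int) (t : List Int) :
    List.foldl pvStep (h :: t) (l.map (· + 1)) = h :: List.foldl pvStep t l := by
  induction l generalizing t with
  | nil => rfl
  | cons a l ih => simp [List.foldl_cons, pvStep_cons_succ, ih]

theorem pvZero_cons (x y : Int) (ys : List Int) :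
    pvZero (x :: y :: ys) =
      (if x = 13 then (0 : Int) :: pvZero (0 :: ys) else x :: pvZero (y :: ys)) := by
  have hr : List.range (ys.length + 1) = 0 :: (List.range ys.length).map (· + 1) := by
    rw [List.range_succ_eq_map]
  simp only [pvZero, List.length_cons]
  split
  · rename_i hx
    have h0 : pvStep (x :: y :: ys) 0 = (0 : Int) :: 0 :: ys := by
      simp [pvStep, hx]
    simp [hr, List.foldl_cons, h0, foldl_pvStep_map_succ]
  · rename_i hx
    have h0 : pvStep (x :: y :: ys) 0 = x :: y :: ys := by
      simp [pvStep, hx]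
    simp [hr, List.foldl_cons, h0, foldl_pvStep_map_succ]

theorem sum_range_getD (ns : List Int) (s : Int) :
    (List.range ns.length).foldl (fun s i => s + ns.getD i 0) s = s + ns.sum := by
  induction ns generalizing s with
  | nil => simp
  | cons h t ih =>
    have hr : List.range (t.length + 1) = 0 :: (List.range t.length).map (· + 1) := by
      rw [List.range_succ_eq_map]
    simp only [List.length_cons, hr, List.foldl_cons, List.foldl_map, List.getD_cons_succ,
      List.getD_cons_zero]
    rw [ih (s + h), List.sum_cons]
    ring

theorem pvGo_acc (xs : List Int) (b : Bool) (t : Int) :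
    pvGo xs b t = t + pvGo xs b 0 := by
  induction xs generalizing b t with
  | nil => simp [pvGo]
  | cons x xs ih =>
    cases b with
    | true => simp only [pvGo]; rw [ih, ih false 0]
    | false =>
      simp only [pvGo]
      split
      · rw [ih, ih true 0]
      · rw [ih, ih false (0 + x)]; ring

theorem pvGo_cons_false (x : Int) (xs : List Int) (t : Int) :
    pvGo (x :: xs) false t = if x = 13 then pvGo xs true t else pvGo xs false (t + x) := rfl

theorem pvGo_cons_true (x : Int) (xs : List Int) (t : Int) :
    pvGo (x :: xs) true t = pvGo xs false t := rfl

theorem pvFix_cons (x y : Int) (ys : List Int) :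
    pvFix (x :: y :: ys) = x :: pvFix (y :: ys) := by
  simp only [pvFix, List.length_cons, Nat.add_sub_cancel, List.getD_cons_succ, List.set_cons_succ]
  split <;> simp [*]

theorem pvFix_length (ns : List Int) : (pvFix ns).length = ns.length := by
  unfold pvFix; split <;> simp

theorem pvFix_ne_nil (ns : List Int) (h : ns ≠ []) : pvFix ns ≠ [] := by
  intro hc
  have := pvFix_length ns
  rw [hc] at this
  exact h (List.eq_nil_of_length_eq_zero this.symm)

theorem main_lemma : ∀ (n : Nat) (nums : List Int), nums.length ≤ n → nums ≠ [] →
    (pvZero (pvFix nums)).sum = pvGo nums false 0 := by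
  intro n
  induction n with
  | zero => intro nums h hne; cases nums with
    | nil => exact absurd rfl hne
    | cons a l => simp at h
  | succ n ih =>
    intro nums hlen hne
    match nums with
    | [] => exact absurd rfl hne
    | [x] =>
      by_cases hx : x = 13 <;>
        simp [pvFix, pvZero, pvGo, hx]
    | x :: y :: ys =>
      rw [pvFix_cons]
      obtain ⟨z, zs, hzz⟩ : ∃ z zs, pvFix (y :: ys) = z :: zs := by
        cases h : pvFix (y :: ys) with
        | nil => exact absurd h (pvFix_ne_nil _ (by simp))
        | cons a l => exact ⟨a, l, rfl⟩
      have hlen2 : (y :: ys).length ≤ n := by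
        simp only [List.length_cons] at hlen ⊢; omega
      by_cases hx : x = 13
      · -- head is 13: it zeroes itself and the next slot; B skips the next element
        subst hx
        rw [hzz, pvZero_cons, if_pos rfl]
        have hgo : pvGo (13 :: y :: ys) false 0 = pvGo ys false 0 := by
          rw [pvGo_cons_false, if_pos rfl, pvGo_cons_true]
        rw [hgo]
        cases ys with
        | nil =>
          -- pvFix (y :: []) = [z] with zs = []
          have hz : zs = [] := by
            have := pvFix_length (y :: ([] : List Int))
            rw [hzz] at this
            simp at this
            exact this
          subst hz
          simp [pvZero, pvGo]
        | cons w ws =>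
          have hzs : zs = pvFix (w :: ws) := by
            have := pvFix_cons y w ws
            rw [hzz] at this
            exact (List.cons.injEq _ _ _ _ ▸ this).2
          obtain ⟨u, us, huu⟩ : ∃ u us, pvFix (w :: ws) = u :: us := by
            cases h : pvFix (w :: ws) with
            | nil => exact absurd h (pvFix_ne_nil _ (by simp))
            | cons a l => exact ⟨a, l, rfl⟩
          rw [hzs, huu, pvZero_cons]
          have h013 : (0 : Int) ≠ 13 := by decide
          rw [if_neg h013]
          have ihw : (pvZero (pvFix (w :: ws))).sum = pvGo (w :: ws) false 0 := by
            apply ih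
            · simp only [List.length_cons] at hlen ⊢; omega
            · simp
          rw [huu] at ihw
          simp [ihw]
      · -- head is not 13: it is kept and added; recurse on the tail
        have ihy : (pvZero (pvFix (y :: ys))).sum = pvGo (y :: ys) false 0 :=
          ih (y :: ys) hlen2 (by simp)
        have hgo : pvGo (x :: y :: ys) false 0 = x + pvGo (y :: ys) false 0 := by
          rw [pvGo_cons_false, if_neg hx, pvGo_acc]; ring
        rw [hzz, pvZero_cons, if_neg hx, ← hzz, hgo, List.sum_cons, ihy]

theorem sum13_eq (nums : List Int) (h : nums ≠ []) :
    sum13 nums = (pvZero (pvFix nums)).sum := by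
  have hl : ¬ nums.length = 0 := by simpa using h
  simp only [sum13, if_neg hl, pvZero, pvFix]
  by_cases hc : nums.getD (nums.length - 1) 0 = 13 <;>
    simp only [if_pos, hc] <;>
    rw [sum_range_getD] <;> simp

-- ===== VERDICT (by name: the statement is the Claim_ definition above) =====
theorem sum13_spec : Claim_equal_sum13 := by
  intro nums _
  unfold Spec_sum13 sum13_alt
  cases nums with
  | nil => simp [sum13, pvGo]
  | cons x xs =>
    rw [sum13_eq (x :: xs) (by simp)]
    exact main_lemma (x :: xs).length (x :: xs) le_rfl (by simp)
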